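-- pv_equiv track=rewrite | github.com/crerwin/appgen | appgen/merger.py | checkforconflicts
-- ===== SOURCE A (Python) =====
-- def checkforconflicts(firstdict, seconddict):
--     # check for conflicting keys in two dictionaries
--     conflict = False
--     conflicting_key = None
--     for key in firstdict:
--         if key in seconddict:
--             conflict = True
--             conflicting_key = key
--     return conflict, conflicting_key
-- ===== SOURCE B (Python) =====
-- def checkforconflicts(firstdict, seconddict):
--     # scan from the tail: the first common key found (in reverse order)
--     # is the last common key in forward order, so we can return early
--     for key in reversed(firstdict):
--         if key in seconddict:
--             return True, key
--     return False, None
-- ===== Notes on version B (the rewrite author's own statement) =====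
-- stated objective: simpler
-- what changed: Replaces the exhaustive forward scan that keeps overwriting an accumulator with an early-exit scan over reversed(firstdict) that returns on the first key present in seconddict (the last common key in forward order), with no accumulator.
import Mathlib
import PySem

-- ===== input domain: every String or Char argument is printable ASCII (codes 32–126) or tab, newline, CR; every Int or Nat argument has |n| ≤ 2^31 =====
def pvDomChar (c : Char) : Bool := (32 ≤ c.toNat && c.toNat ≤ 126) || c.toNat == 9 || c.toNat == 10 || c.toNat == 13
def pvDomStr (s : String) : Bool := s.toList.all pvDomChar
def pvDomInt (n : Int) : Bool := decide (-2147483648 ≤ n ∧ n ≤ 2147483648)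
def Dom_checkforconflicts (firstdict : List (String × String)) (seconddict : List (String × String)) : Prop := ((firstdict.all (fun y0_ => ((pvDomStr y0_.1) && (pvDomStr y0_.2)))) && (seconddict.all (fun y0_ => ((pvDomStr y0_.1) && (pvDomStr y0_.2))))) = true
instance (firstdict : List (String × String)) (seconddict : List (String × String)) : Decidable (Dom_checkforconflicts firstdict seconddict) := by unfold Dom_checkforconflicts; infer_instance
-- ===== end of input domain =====

-- B replaces A's exhaustive overwrite-to-the-end scan with an early-exit scan from the tail (simpler, no accumulator); same return value.

-- ===== PORT A =====
-- forward loop over keys, overwriting (conflict, conflicting_key) on every hit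
def checkforconflicts (firstdict : List (String × String)) (seconddict : List (String × String)) : Bool × Option String :=
  firstdict.foldl
    (fun acc kv =>
      if seconddict.any (fun p => p.1 == kv.1) then (true, some kv.1) else acc)
    (false, none)

-- ===== PORT B =====
-- early-return loop over the reversed list: first hit wins
def cfcRevScan (seconddict : List (String × String)) : List (String × String) → Bool × Option String
  | [] => (false, none)
  | kv :: rest =>
    if seconddict.any (fun p => p.1 == kv.1) then (true, some kv.1)
    else cfcRevScan seconddict rest

def checkforconflicts_alt (firstdict : List (String × String)) (seconddict : List (String × String)) : Bool × Option String :=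
  cfcRevScan seconddict firstdict.reverse

-- ===== PRECONDITION & SPEC =====
def Spec_checkforconflicts (firstdict : List (String × String)) (seconddict : List (String × String)) (out : Bool × Option String) : Prop := out = checkforconflicts_alt firstdict seconddict
instance (firstdict : List (String × String)) (seconddict : List (String × String)) (out : Bool × Option String) : Decidable (Spec_checkforconflicts firstdict seconddict out) := by unfold Spec_checkforconflicts; infer_instance

-- ===== CLAIM (what is proved, stated in full; the proofs are below) =====
def Claim_equal_checkforconflicts : Prop := ∀ (firstdict : List (String × String)) (seconddict : List (String × String)), Dom_checkforconflicts firstdict seconddict → Spec_checkforconflicts firstdict seconddict (checkforconflicts firstdict seconddict)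

-- ===== LEMMAS AND PROOFS =====

-- first-hit scan distributes over snoc: a hit in the prefix shadows the new last element
lemma cfcRevScan_append_singleton (s : List (String × String)) (l : List (String × String)) (x : String × String) :
    cfcRevScan s (l ++ [x]) =
      (if (cfcRevScan s l).1 then cfcRevScan s l
       else if s.any (fun p => p.1 == x.1) then (true, some x.1) else (false, none)) := by
  induction l with
  | nil => simp [cfcRevScan]
  | cons y l ih =>
    simp only [List.cons_append, cfcRevScan]
    by_cases h : s.any (fun p => p.1 == y.1) <;> simp [h, ih]

-- A's fold from any accumulator equals B's reverse scan, falling back to the accumulator on no hit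
lemma foldl_eq_revScan (s : List (String × String)) (l : List (String × String)) (acc : Bool × Option String) :
    l.foldl (fun acc kv => if s.any (fun p => p.1 == kv.1) then (true, some kv.1) else acc) acc =
      (if (cfcRevScan s l.reverse).1 then cfcRevScan s l.reverse else acc) := by
  induction l generalizing acc with
  | nil => simp [cfcRevScan]
  | cons x l ih =>
    simp only [List.foldl_cons, List.reverse_cons, ih, cfcRevScan_append_singleton]
    by_cases h1 : (cfcRevScan s l.reverse).1 <;>
      by_cases h2 : s.any (fun p => p.1 == x.1) <;> simp [h1, h2]

-- if the scan's flag is false, the whole result is the no-hit pair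
lemma cfcRevScan_false (s : List (String × String)) (l : List (String × String))
    (h : (cfcRevScan s l).1 = false) : cfcRevScan s l = (false, none) := by
  induction l with
  | nil => simp [cfcRevScan]
  | cons x l ih =>
    simp only [cfcRevScan] at h ⊢
    split at h <;> simp_all

-- ===== VERDICT (by name: the statement is the Claim_ definition above) =====
theorem checkforconflicts_spec : Claim_equal_checkforconflicts := by
  intro f s _
  unfold Spec_checkforconflicts checkforconflicts checkforconflicts_alt
  rw [foldl_eq_revScan]
  by_cases h : (cfcRevScan s f.reverse).1
  · simp [h]
  · simp [h, cfcRevScan_false s f.reverse (by simp [h])]
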